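-- pv_equiv track=rewrite | github.com/s-alex-developer/Group_work_VKinder | project/Vkinder_bot.py | cleans_all_tag_from_str
-- ===== SOURCE A (Python) =====
-- def cleans_all_tag_from_str(string_line: str) -> str:
--
--     """
--         Функция очищает строковые данные, переданные в нее в качестве аргумента, от html тегов и их содержимого.
--
--         Args:
--             string_line: str - исходные строковые данные.
--
--         Returns: str - строковые данные очищенные от тегов.
--     """
--
--     result = ""
--     not_skip = True
--
--     for i in list(string_line):
--
--         if not_skip:
--
--             if i == "<":
--                 not_skip = False
--
--             else:
--                 result += i
--
--         else:
--
--             if i == ">":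
--                 not_skip = True
--
--     return result
-- ===== SOURCE B (Python) =====
-- def cleans_all_tag_from_str(string_line: str) -> str:
--     pieces = []
--     rest = string_line
--     while True:
--         i = rest.find("<")
--         if i == -1:
--             pieces.append(rest)
--             break
--         pieces.append(rest[:i])
--         j = rest.find(">", i)
--         if j == -1:
--             break
--         rest = rest[j + 1:]
--     return "".join(pieces)
-- ===== Notes on version B (the rewrite author's own statement) =====
-- stated objective: faster
-- what changed: Replaces A's per-character state machine (skip flag, one-character string appends) with a find/slice scan that jumps directly between '<' and '>' delimiter positions, collecting the kept slices and joining them once.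
import Mathlib
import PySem

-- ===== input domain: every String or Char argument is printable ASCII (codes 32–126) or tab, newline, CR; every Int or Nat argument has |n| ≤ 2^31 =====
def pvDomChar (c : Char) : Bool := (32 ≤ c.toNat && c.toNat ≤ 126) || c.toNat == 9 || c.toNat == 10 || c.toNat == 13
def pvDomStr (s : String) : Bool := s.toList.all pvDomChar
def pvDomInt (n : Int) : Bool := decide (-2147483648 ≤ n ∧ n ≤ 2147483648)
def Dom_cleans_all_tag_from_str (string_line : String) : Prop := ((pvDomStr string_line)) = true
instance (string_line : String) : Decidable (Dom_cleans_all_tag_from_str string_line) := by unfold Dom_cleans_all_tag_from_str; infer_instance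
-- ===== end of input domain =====

-- B replaces A's per-character skip-flag state machine by a find/slice scan that jumps
-- between '<' and '>' delimiter positions and joins the kept pieces (objective: alternative).

-- ===== PORT A =====
-- A: for i in list(string_line): state (result, not_skip), result += i outside tags.
def cleans_all_tag_from_str (string_line : String) : String :=
  let fin := string_line.toList.foldl
    (fun (st : List Char × Bool) i =>
      if st.2 then
        (if i = '<' then (st.1, false) else (st.1 ++ [i], true))
      else
        (if i = '>' then (st.1, true) else st))
    ([], true)
  String.ofList fin.1

-- ===== PORT B =====
-- B's while loop over `rest` with accumulator `pieces`; i = rest.find("<"), j = rest.find(">", i).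
def pvAltGo (rest : List Char) (pieces : List (List Char)) : List (List Char) :=
  if hi : PySem.Chars.find rest ['<'] = -1 then
    pieces ++ [rest]
  else
    if hj : PySem.Chars.findFrom rest ['>'] (PySem.Chars.find rest ['<']) = -1 then
      pieces ++ [PySem.List.slice rest none (some (PySem.Chars.find rest ['<']))]
    else
      pvAltGo (PySem.List.slice rest (some (PySem.Chars.findFrom rest ['>'] (PySem.Chars.find rest ['<']) + 1)) none)
              (pieces ++ [PySem.List.slice rest none (some (PySem.Chars.find rest ['<']))])
termination_by rest.length
decreasing_by
  have h0 : (0:Int) ≤ PySem.Chars.find rest ['<'] := by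
    have := PySem.Chars.neg_one_le_find rest ['<']
    omega
  have hmem : '<' ∈ rest := by
    have := (PySem.Chars.find_nonneg_iff rest ['<']).mp h0
    exact (List.singleton_infix_iff '<' rest).mp this
  have hne : rest ≠ [] := by rintro rfl; simp at hmem
  have hn : (PySem.Chars.find rest ['<']).toNat ≤ rest.length := by
    have := PySem.Chars.find_le_length rest ['<']
    omega
  have hj0 : (0:Int) ≤ PySem.Chars.findFrom rest ['>'] (PySem.Chars.find rest ['<']) := by
    have hcast : PySem.Chars.find rest ['<'] = ((PySem.Chars.find rest ['<']).toNat : Int) := by omega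
    rw [hcast, PySem.Chars.findFrom_natCast rest ['>'] _ hn] at hj ⊢
    by_cases hc : PySem.Chars.find (rest.drop (PySem.Chars.find rest ['<']).toNat) ['>'] = -1
    · rw [if_pos hc] at hj
      exact absurd rfl hj
    · rw [if_neg hc]
      have := PySem.Chars.neg_one_le_find (rest.drop (PySem.Chars.find rest ['<']).toNat) ['>']
      omega
  rw [PySem.List.slice_from rest (by omega : (0:Int) ≤ PySem.Chars.findFrom rest ['>'] (PySem.Chars.find rest ['<']) + 1)]
  have hlen : 0 < rest.length := List.length_pos_iff.mpr hne
  have : 0 < (PySem.Chars.findFrom rest ['>'] (PySem.Chars.find rest ['<']) + 1).toNat := by omega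
  simp only [List.length_drop]
  omega

def cleans_all_tag_from_str_alt (string_line : String) : String :=
  String.ofList (PySem.Chars.join [] (pvAltGo string_line.toList []))

-- ===== PRECONDITION & SPEC =====
def Spec_cleans_all_tag_from_str (string_line : String) (out : String) : Prop := out = cleans_all_tag_from_str_alt string_line
instance (string_line : String) (out : String) : Decidable (Spec_cleans_all_tag_from_str string_line out) := by unfold Spec_cleans_all_tag_from_str; infer_instance

-- ===== CLAIM (what is proved, stated in full; the proofs are below) =====
def Claim_equal_cleans_all_tag_from_str : Prop := ∀ (string_line : String), Dom_cleans_all_tag_from_str string_line → Spec_cleans_all_tag_from_str string_line (cleans_all_tag_from_str string_line)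

-- ===== LEMMAS AND PROOFS =====

-- reference recursion: A's state machine without the accumulator
def pvGoA : Bool → List Char → List Char
  | _, [] => []
  | true, c :: t => if c = '<' then pvGoA false t else c :: pvGoA true t
  | false, c :: t => if c = '>' then pvGoA true t else pvGoA false t

lemma pvGoA_foldl (l : List Char) : ∀ (res : List Char) (b : Bool),
    (l.foldl
      (fun (st : List Char × Bool) i =>
        if st.2 then
          (if i = '<' then (st.1, false) else (st.1 ++ [i], true))
        else
          (if i = '>' then (st.1, true) else st))
      (res, b)).1 = res ++ pvGoA b l := by
  induction l with
  | nil => intro res b; simp [pvGoA]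
  | cons c t ih =>
    intro res b
    cases b with
    | true =>
      by_cases h : c = '<'
      · simp [List.foldl_cons, h, ih, pvGoA]
      · simp [List.foldl_cons, h, ih, pvGoA, List.append_assoc]
    | false =>
      by_cases h : c = '>'
      · simp [List.foldl_cons, h, ih, pvGoA]
      · simp [List.foldl_cons, h, ih, pvGoA]

lemma pvGoA_true_append (pre l : List Char) (h : '<' ∉ pre) :
    pvGoA true (pre ++ l) = pre ++ pvGoA true l := by
  induction pre with
  | nil => simp
  | cons c t ih =>
    simp only [List.mem_cons, not_or] at h
    simp [pvGoA, Ne.symm h.1, ih h.2]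

lemma pvGoA_false_append (pre l : List Char) (h : '>' ∉ pre) :
    pvGoA false (pre ++ l) = pvGoA false l := by
  induction pre with
  | nil => simp
  | cons c t ih =>
    simp only [List.mem_cons, not_or] at h
    simp [pvGoA, Ne.symm h.1, ih h.2]

-- characterisation of Python's s.find(c) for a one-character needle
lemma pvFind_char (cs : List Char) (c : Char) (h : PySem.Chars.find cs [c] ≠ -1) :
    ∃ n : Nat, PySem.Chars.find cs [c] = (n : Int) ∧ n < cs.length ∧
      cs.drop n = c :: cs.drop (n + 1) ∧ c ∉ cs.take n := by
  have h0 : (0:Int) ≤ PySem.Chars.find cs [c] := by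
    have := PySem.Chars.neg_one_le_find cs [c]; omega
  refine ⟨(PySem.Chars.find cs [c]).toNat, by omega, ?_⟩
  have hspec := PySem.Chars.findFrom_natCast_spec cs [c] 0 (by omega)
  rw [Nat.cast_zero, PySem.Chars.findFrom_zero] at hspec
  obtain ⟨-, hpre, hmin⟩ := hspec h
  set n := (PySem.Chars.find cs [c]).toNat with hn
  obtain ⟨t, ht⟩ := hpre
  have hteq : cs.drop n = c :: t := by rw [← ht]; rfl
  have hlen : n < cs.length := by
    by_contra hge
    rw [List.drop_eq_nil_of_le (by omega)] at hteq
    simp at hteq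
  have hdd : cs.drop (n + 1) = t := by
    have h1 : cs.drop (n + 1) = (cs.drop n).drop 1 := by
      rw [List.drop_drop]
    rw [h1, hteq]
    rfl
  have hdrop : cs.drop n = c :: cs.drop (n + 1) := by rw [hteq, hdd]
  refine ⟨hlen, hdrop, ?_⟩
  intro hcmem
  obtain ⟨k, hk, hkc⟩ := List.getElem_of_mem hcmem
  have hkn : k < n := by
    have := List.length_take_le n cs
    have h2 : (cs.take n).length = min n cs.length := List.length_take ..
    omega
  have hklen : k < cs.length := by omega
  have hck : cs[k]'hklen = c := by
    rw [List.getElem_take] at hkc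
    exact hkc
  apply hmin k (by omega) (by omega)
  refine ⟨cs.drop (k + 1), ?_⟩
  rw [List.drop_eq_getElem_cons hklen, hck]
  rfl

lemma pvGoA_true_no (l : List Char) (h : '<' ∉ l) : pvGoA true l = l := by
  have h0 : pvGoA true ([] : List Char) = [] := rfl
  have := pvGoA_true_append l [] h
  rw [List.append_nil, h0, List.append_nil] at this
  exact this

lemma pvGoA_false_no (l : List Char) (h : '>' ∉ l) : pvGoA false l = [] := by
  have h0 : pvGoA false ([] : List Char) = [] := rfl
  have := pvGoA_false_append l [] h
  rw [List.append_nil, h0] at this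
  exact this

lemma pvJoin_nil_flatten (ps : List (List Char)) :
    PySem.Chars.join [] ps = ps.flatten := by
  induction ps with
  | nil => simp [PySem.Chars.join_nil]
  | cons p ps ih =>
    cases ps with
    | nil => simp [PySem.Chars.join_singleton]
    | cons q qs => rw [PySem.Chars.join_cons_cons, ih]; simp

lemma pvAltGo_flatten (N : Nat) : ∀ (rest : List Char), rest.length ≤ N →
    ∀ pieces, (pvAltGo rest pieces).flatten = pieces.flatten ++ pvGoA true rest := by
  induction N with
  | zero =>
    intro rest hlen pieces
    have hre : rest = [] := List.length_eq_zero_iff.mp (by omega)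
    subst hre
    rw [pvAltGo]
    have hf : PySem.Chars.find ([] : List Char) ['<'] = -1 := by decide
    simp [hf, pvGoA]
  | succ N ih =>
    intro rest hlen pieces
    rw [pvAltGo]
    by_cases hi : PySem.Chars.find rest ['<'] = -1
    · -- no '<' at all: B emits rest, A copies everything
      have hnotmem : '<' ∉ rest := by
        intro hmem
        exact absurd ((List.singleton_infix_iff '<' rest).mpr hmem)
          ((PySem.Chars.find_eq_neg_one_iff rest ['<']).mp hi)
      simp [hi, pvGoA_true_no rest hnotmem]
    · obtain ⟨n, hfind, hnlt, hdrop, hnotin⟩ := pvFind_char rest '<' hi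
      have hn_le : n ≤ rest.length := by omega
      have hsplit : rest = rest.take n ++ rest.drop n := (List.take_append_drop n rest).symm
      have hA : pvGoA true rest = rest.take n ++ pvGoA false (rest.drop (n + 1)) := by
        conv_lhs => rw [hsplit]
        rw [pvGoA_true_append _ _ hnotin, hdrop]
        simp [pvGoA]
      have hslice : PySem.List.slice rest none (some (PySem.Chars.find rest ['<'])) = rest.take n := by
        rw [hfind, PySem.List.slice_to rest (by omega)]
        simp
      have hjeq : PySem.Chars.findFrom rest ['>'] (PySem.Chars.find rest ['<'])
          = (if PySem.Chars.find (rest.drop n) ['>'] = -1 then -1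
             else (n : Int) + PySem.Chars.find (rest.drop n) ['>']) := by
        rw [hfind]
        exact PySem.Chars.findFrom_natCast rest ['>'] n hn_le
      by_cases hm : PySem.Chars.find (rest.drop n) ['>'] = -1
      · -- unclosed tag: both drop to end of string
        have hnotgt : '>' ∉ rest.drop n := by
          intro hmem
          exact absurd ((List.singleton_infix_iff '>' (rest.drop n)).mpr hmem)
            ((PySem.Chars.find_eq_neg_one_iff _ ['>']).mp hm)
        have hnotgt' : '>' ∉ rest.drop (n + 1) := by
          intro hmem; apply hnotgt; rw [hdrop]; simp [hmem]
        have hjneg : PySem.Chars.findFrom rest ['>'] (PySem.Chars.find rest ['<']) = -1 := by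
          rw [hjeq, if_pos hm]
        rw [dif_neg hi, dif_pos hjneg, hslice]
        simp [hA, pvGoA_false_no _ hnotgt']
      · -- tag closed at j = n + m
        obtain ⟨m, hfm, hmlt, hdropm, hnotinm⟩ := pvFind_char (rest.drop n) '>' hm
        have hm1 : 1 ≤ m := by
          rcases Nat.eq_zero_or_pos m with h0 | h1
          · subst h0
            rw [List.drop_zero] at hdropm
            rw [hdrop] at hdropm
            exact absurd (List.cons.injEq .. ▸ hdropm).1 (by decide)
          · exact h1
        have hjval : PySem.Chars.findFrom rest ['>'] (PySem.Chars.find rest ['<']) = ((n + m : Nat) : Int) := by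
          rw [hjeq, if_neg hm, hfm]
          push_cast
          ring
        have hjne : PySem.Chars.findFrom rest ['>'] (PySem.Chars.find rest ['<']) ≠ -1 := by
          rw [hjval]; omega
        have hdropsl : PySem.List.slice rest (some (PySem.Chars.findFrom rest ['>'] (PySem.Chars.find rest ['<']) + 1)) none
            = rest.drop (n + m + 1) := by
          have hc1 : ((n + m : Nat) : Int) + 1 = ((n + m + 1 : Nat) : Int) := by push_cast; ring
          rw [hjval, hc1, PySem.List.slice_from rest (by omega), Int.toNat_natCast]
        rw [dif_neg hi, dif_neg hjne, hslice, hdropsl]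
        -- A side: after the '<', skip up to the first '>' then continue
        have hAfalse : pvGoA false (rest.drop (n + 1)) = pvGoA true (rest.drop (n + m + 1)) := by
          rw [hdrop] at hnotinm hdropm
          obtain ⟨m', rfl⟩ : ∃ m', m = m' + 1 := ⟨m - 1, by omega⟩
          rw [List.take_succ_cons] at hnotinm
          rw [List.drop_succ_cons, List.drop_succ_cons] at hdropm
          have hnot' : '>' ∉ (rest.drop (n + 1)).take m' := fun hmem => hnotinm (List.mem_cons_of_mem _ hmem)
          conv_lhs => rw [← List.take_append_drop m' (rest.drop (n + 1))]
          rw [pvGoA_false_append _ _ hnot', hdropm]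
          have hdd : (rest.drop (n + 1)).drop (m' + 1) = rest.drop (n + (m' + 1) + 1) := by
            simp only [List.drop_drop]
            congr 1
            omega
          rw [hdd]
          simp [pvGoA]
        have hlen' : (rest.drop (n + m + 1)).length ≤ N := by
          simp only [List.length_drop]
          omega
        rw [ih _ hlen']
        rw [hA, hAfalse]
        simp

-- ===== VERDICT (by name: the statement is the Claim_ definition above) =====
theorem cleans_all_tag_from_str_spec : Claim_equal_cleans_all_tag_from_str := by
  intro s _
  unfold Spec_cleans_all_tag_from_str cleans_all_tag_from_str cleans_all_tag_from_str_alt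
  rw [pvJoin_nil_flatten, pvAltGo_flatten s.toList.length s.toList le_rfl []]
  simp [pvGoA_foldl]
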